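-- pv_equiv track=rewrite | github.com/xenophobed/isA_MCP | prompts/prompt_selector.py | _categorize_prompt
-- ===== SOURCE A (Python) =====
-- def _categorize_prompt(prompt_name: str) -> str:
--     """Categorize prompt based on name patterns"""
--     prompt_name_lower = prompt_name.lower()
--
--     if any(word in prompt_name_lower for word in ["security", "analysis", "audit"]):
--         return "security"
--     elif any(word in prompt_name_lower for word in ["memory", "organization", "recall"]):
--         return "memory"
--     elif any(word in prompt_name_lower for word in ["monitoring", "performance", "metrics"]):
--         return "monitoring"
--     elif any(word in prompt_name_lower for word in ["assistance", "help", "support"]):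
--         return "assistance"
--     elif any(word in prompt_name_lower for word in ["stylist", "fashion", "style", "outfit"]):
--         return "shopping"
--     elif any(word in prompt_name_lower for word in ["shopping", "product", "comparison"]):
--         return "shopping"
--     elif any(word in prompt_name_lower for word in ["autonomous", "execution", "planning"]):
--         return "autonomous"
--     else:
--         return "general"
-- ===== SOURCE B (Python) =====
-- KEYWORDS = {
--     "security": (0, "security"), "analysis": (0, "security"), "audit": (0, "security"),
--     "memory": (1, "memory"), "organization": (1, "memory"), "recall": (1, "memory"),
--     "monitoring": (2, "monitoring"), "performance": (2, "monitoring"), "metrics": (2, "monitoring"),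
--     "assistance": (3, "assistance"), "help": (3, "assistance"), "support": (3, "assistance"),
--     "stylist": (4, "shopping"), "fashion": (4, "shopping"), "style": (4, "shopping"),
--     "outfit": (4, "shopping"), "shopping": (4, "shopping"), "product": (4, "shopping"),
--     "comparison": (4, "shopping"),
--     "autonomous": (5, "autonomous"), "execution": (5, "autonomous"), "planning": (5, "autonomous"),
-- }
-- LENGTHS = sorted({len(w) for w in KEYWORDS})
--
--
-- def _categorize_prompt(prompt_name: str) -> str:
--     # Single left-to-right scan: hash every window whose length is a keyword
--     # length into the keyword table, keep the hit of highest precedence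
--     # (lowest rule priority).  No per-keyword substring searches.
--     s = prompt_name.lower()
--     n = len(s)
--     best = None
--     for i in range(n):
--         for L in LENGTHS:
--             if i + L <= n:
--                 hit = KEYWORDS.get(s[i:i + L])
--                 if hit is not None and (best is None or hit[0] < best[0]):
--                     best = hit
--     return best[1] if best is not None else "general"
-- ===== Notes on version B (the rewrite author's own statement) =====
-- stated objective: alternative
-- what changed: Replaces the if/elif chain of per-keyword substring searches with a single sliding-window scan of the name that hashes each window of a keyword length into a keyword->(priority,category) dictionary and keeps the hit of minimal rule priority.
import Mathlib
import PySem

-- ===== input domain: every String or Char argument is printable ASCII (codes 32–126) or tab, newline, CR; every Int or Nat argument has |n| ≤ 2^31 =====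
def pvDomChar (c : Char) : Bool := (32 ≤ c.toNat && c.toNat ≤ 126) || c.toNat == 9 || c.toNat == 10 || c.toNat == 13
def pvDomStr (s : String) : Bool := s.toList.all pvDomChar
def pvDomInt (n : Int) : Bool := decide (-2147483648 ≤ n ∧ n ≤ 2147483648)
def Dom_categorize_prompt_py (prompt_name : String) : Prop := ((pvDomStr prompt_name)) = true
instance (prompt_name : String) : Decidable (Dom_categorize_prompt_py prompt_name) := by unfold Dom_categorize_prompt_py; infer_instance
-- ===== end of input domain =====

-- B replaces A's chain of per-keyword substring searches by a single sliding-window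
-- scan with a keyword→(priority, category) dictionary, keeping the minimal-priority hit
-- (alternative algorithm, similar cost).

-- ===== PORT A =====
def categorize_prompt_py (prompt_name : String) : String :=
  let prompt_name_lower := PySem.Str.lower prompt_name
  if (["security", "analysis", "audit"] : List String).any
      (fun word => PySem.Str.isIn word prompt_name_lower) then "security"
  else if (["memory", "organization", "recall"] : List String).any
      (fun word => PySem.Str.isIn word prompt_name_lower) then "memory"
  else if (["monitoring", "performance", "metrics"] : List String).any
      (fun word => PySem.Str.isIn word prompt_name_lower) then "monitoring"
  else if (["assistance", "help", "support"] : List String).any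
      (fun word => PySem.Str.isIn word prompt_name_lower) then "assistance"
  else if (["stylist", "fashion", "style", "outfit"] : List String).any
      (fun word => PySem.Str.isIn word prompt_name_lower) then "shopping"
  else if (["shopping", "product", "comparison"] : List String).any
      (fun word => PySem.Str.isIn word prompt_name_lower) then "shopping"
  else if (["autonomous", "execution", "planning"] : List String).any
      (fun word => PySem.Str.isIn word prompt_name_lower) then "autonomous"
  else "general"

-- ===== PORT B =====
-- the KEYWORDS dictionary of Source B: keyword (as code points) → (rule priority, category)
def pvKW : List (List Char × Nat × String) :=
  [("security".toList, 0, "security"), ("analysis".toList, 0, "security"), ("audit".toList, 0, "security"),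
   ("memory".toList, 1, "memory"), ("organization".toList, 1, "memory"), ("recall".toList, 1, "memory"),
   ("monitoring".toList, 2, "monitoring"), ("performance".toList, 2, "monitoring"), ("metrics".toList, 2, "monitoring"),
   ("assistance".toList, 3, "assistance"), ("help".toList, 3, "assistance"), ("support".toList, 3, "assistance"),
   ("stylist".toList, 4, "shopping"), ("fashion".toList, 4, "shopping"), ("style".toList, 4, "shopping"),
   ("outfit".toList, 4, "shopping"), ("shopping".toList, 4, "shopping"), ("product".toList, 4, "shopping"),
   ("comparison".toList, 4, "shopping"),
   ("autonomous".toList, 5, "autonomous"), ("execution".toList, 5, "autonomous"), ("planning".toList, 5, "autonomous")]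

-- the sorted distinct keyword lengths (Source B's LENGTHS)
def pvLengths : List Nat := [4, 5, 6, 7, 8, 9, 10, 11, 12]

-- KEYWORDS.get
def pvLookup (cs : List Char) : Option (Nat × String) :=
  (pvKW.find? (fun e => e.1 == cs)).map (·.2)

-- 'if hit is not None and (best is None or hit[0] < best[0]): best = hit'
def pvMin (best : Option (Nat × String)) (hit : Nat × String) : Option (Nat × String) :=
  match best with
  | none => some hit
  | some b => if hit.1 < b.1 then some hit else some b

def categorize_prompt_py_alt (prompt_name : String) : String :=
  let s := (PySem.Str.lower prompt_name).toList
  let best := (List.range s.length).foldl (fun best i =>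
    pvLengths.foldl (fun best L =>
      if i + L ≤ s.length then
        match pvLookup ((s.drop i).take L) with
        | some hit => pvMin best hit
        | none => best
      else best) best) none
  match best with
  | some b => b.2
  | none => "general"

-- ===== PRECONDITION & SPEC =====
def Spec_categorize_prompt_py (prompt_name : String) (out : String) : Prop := out = categorize_prompt_py_alt prompt_name
instance (prompt_name : String) (out : String) : Decidable (Spec_categorize_prompt_py prompt_name out) := by unfold Spec_categorize_prompt_py; infer_instance

-- ===== CLAIM (what is proved, stated in full; the proofs are below) =====
def Claim_equal_categorize_prompt_py : Prop := ∀ (prompt_name : String), Dom_categorize_prompt_py prompt_name → Spec_categorize_prompt_py prompt_name (categorize_prompt_py prompt_name)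

-- ===== LEMMAS AND PROOFS =====

-- the multiset of dictionary hits produced by B's double loop
def pvHits (s : List Char) : List (Nat × String) :=
  (List.range s.length).flatMap (fun i =>
    pvLengths.filterMap (fun L =>
      if i + L ≤ s.length then pvLookup ((s.drop i).take L) else none))

def pvStep {β γ : Type} (g : γ → β → γ) (a : γ) (o : Option β) : γ :=
  match o with
  | some b => g a b
  | none => a

theorem pv_foldl_filterMap {α β γ : Type} (l : List α) (f : α → Option β) (g : γ → β → γ)
    (acc : γ) :
    l.foldl (fun a x => pvStep g a (f x)) acc = (l.filterMap f).foldl g acc := by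
  induction l generalizing acc with
  | nil => rfl
  | cons x xs ih =>
    rw [List.foldl_cons, List.filterMap_cons]
    cases hfx : f x with
    | none => exact ih acc
    | some b => exact ih (g acc b)

theorem pv_foldl_flatMap {α β γ : Type} (l : List α) (f : α → List β) (g : γ → β → γ)
    (acc : γ) :
    l.foldl (fun a x => (f x).foldl g a) acc = (l.flatMap f).foldl g acc := by
  induction l generalizing acc with
  | nil => rfl
  | cons x xs ih => simp [List.flatMap_cons, List.foldl_append, ih]

theorem pvFold_inner (s : List Char) (i : Nat) (acc : Option (Nat × String)) :
    pvLengths.foldl (fun best L =>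
      if i + L ≤ s.length then
        match pvLookup ((s.drop i).take L) with
        | some hit => pvMin best hit
        | none => best
      else best) acc
    = (pvLengths.filterMap (fun L =>
        if i + L ≤ s.length then pvLookup ((s.drop i).take L) else none)).foldl pvMin acc := by
  have hfun : (fun (best : Option (Nat × String)) L =>
      if i + L ≤ s.length then
        match pvLookup ((s.drop i).take L) with
        | some hit => pvMin best hit
        | none => best
      else best)
    = (fun (best : Option (Nat × String)) L =>
        pvStep pvMin best (if i + L ≤ s.length then pvLookup ((s.drop i).take L) else none)) := by
    funext b L
    split
    · cases pvLookup ((s.drop i).take L) <;> rfl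
    · rfl
  rw [hfun]
  exact pv_foldl_filterMap pvLengths (fun L => if i + L ≤ s.length then pvLookup ((s.drop i).take L) else none) pvMin acc

theorem pvFold_eq_hits (s : List Char) :
    (List.range s.length).foldl (fun best i =>
      pvLengths.foldl (fun best L =>
        if i + L ≤ s.length then
          match pvLookup ((s.drop i).take L) with
          | some hit => pvMin best hit
          | none => best
        else best) best) none
    = (pvHits s).foldl pvMin none := by
  unfold pvHits
  have hfun : (fun (best : Option (Nat × String)) i =>
      pvLengths.foldl (fun best L =>
        if i + L ≤ s.length then
          match pvLookup ((s.drop i).take L) with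
          | some hit => pvMin best hit
          | none => best
        else best) best)
    = (fun (best : Option (Nat × String)) i =>
        (pvLengths.filterMap (fun L =>
          if i + L ≤ s.length then pvLookup ((s.drop i).take L) else none)).foldl pvMin best) := by
    funext b i
    exact pvFold_inner s i b
  rw [hfun]
  exact pv_foldl_flatMap (List.range s.length) (fun i => pvLengths.filterMap (fun L => if i + L ≤ s.length then pvLookup ((s.drop i).take L) else none)) pvMin none

theorem pvMin_fold_mem (hits : List (Nat × String)) (acc : Option (Nat × String)) (h : Nat × String)
    (hf : hits.foldl pvMin acc = some h) : acc = some h ∨ h ∈ hits := by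
  induction hits generalizing acc with
  | nil => exact Or.inl hf
  | cons x xs ih =>
    rcases ih (pvMin acc x) hf with hm | hm
    · cases acc with
      | none =>
        simp only [pvMin] at hm
        right; rw [← Option.some_inj.mp hm]; exact List.mem_cons_self
      | some b =>
        simp only [pvMin] at hm
        split at hm
        · right; rw [← Option.some_inj.mp hm]; exact List.mem_cons_self
        · exact Or.inl hm
    · exact Or.inr (List.mem_cons_of_mem x hm)

theorem pvMin_fold_acc_le (hits : List (Nat × String)) (b h : Nat × String)
    (hf : hits.foldl pvMin (some b) = some h) : h.1 ≤ b.1 := by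
  induction hits generalizing b with
  | nil => simp_all
  | cons x xs ih =>
    simp only [List.foldl_cons, pvMin] at hf
    split at hf
    · exact le_of_lt (lt_of_le_of_lt (ih x hf) (by assumption))
    · exact ih b hf

theorem pvMin_fold_le (hits : List (Nat × String)) (acc : Option (Nat × String)) (h : Nat × String)
    (hf : hits.foldl pvMin acc = some h) : ∀ x ∈ hits, h.1 ≤ x.1 := by
  induction hits generalizing acc with
  | nil => intro x hx; cases hx
  | cons y ys ih =>
    intro x hx
    rcases List.mem_cons.mp hx with rfl | hx'
    · have hc : ∃ c : Nat × String, pvMin acc x = some c ∧ c.1 ≤ x.1 := by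
        cases acc with
        | none => exact ⟨x, rfl, le_refl _⟩
        | some b =>
          simp only [pvMin]
          split
          · exact ⟨x, rfl, le_refl _⟩
          · exact ⟨b, rfl, by omega⟩
      rcases hc with ⟨c, hceq, hcle⟩
      rw [List.foldl_cons, hceq] at hf
      exact le_trans (pvMin_fold_acc_le ys c h hf) hcle
    · exact ih (pvMin acc y) hf x hx'

theorem pvMin_fold_some (hits : List (Nat × String)) (b : Option (Nat × String)) (x : Nat × String) :
    ∃ h, hits.foldl pvMin (pvMin b x) = some h := by
  induction hits generalizing b x with
  | nil =>
    cases b with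
    | none => exact ⟨x, rfl⟩
    | some c =>
      simp only [pvMin]
      split
      · exact ⟨x, rfl⟩
      · exact ⟨c, rfl⟩
  | cons y ys ih => exact ih (pvMin b x) y

-- facts about the literal keyword table, checked by computation
theorem pvKW_facts : ∀ e ∈ pvKW, e.1.length ∈ pvLengths ∧ e.1 ≠ [] ∧ pvLookup e.1 = some e.2 := by
  decide

theorem pvMem_hits_iff (s : List Char) (h : Nat × String) :
    h ∈ pvHits s ↔ ∃ e ∈ pvKW, e.2 = h ∧ e.1 <:+: s := by
  constructor
  · intro hm
    simp only [pvHits, List.mem_flatMap, List.mem_filterMap, List.mem_range] at hm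
    rcases hm with ⟨i, _, L, _, heq⟩
    split at heq
    · rcases Option.map_eq_some_iff.mp heq with ⟨e, hfind, he2⟩
      refine ⟨e, List.mem_of_find?_eq_some hfind, he2, ?_⟩
      have hkey : e.1 = (s.drop i).take L := by
        have := List.find?_some hfind
        simpa using this
      rw [hkey]
      exact (List.take_prefix L (s.drop i)).isInfix.trans (List.drop_suffix i s).isInfix
    · cases heq
  · rintro ⟨e, he, rfl, hinf⟩
    obtain ⟨hL, hne, hlook⟩ := pvKW_facts e he
    have hdrop : ∃ j, e.1 <+: s.drop j :=
      (PySem.Chars.exists_prefix_drop_iff_isIn e.1 s).mpr ((PySem.Chars.isIn_iff_infix e.1 s).mpr hinf)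
    rcases hdrop with ⟨j, hpre⟩
    have hkey : e.1 = (s.drop j).take e.1.length := List.prefix_iff_eq_take.mp hpre
    have hlen : e.1.length ≤ s.length - j := by
      have := hpre.length_le
      simpa using this
    have hpos : 0 < e.1.length := List.length_pos_iff.mpr hne
    simp only [pvHits, List.mem_flatMap, List.mem_filterMap, List.mem_range]
    refine ⟨j, by omega, e.1.length, hL, ?_⟩
    rw [if_pos (by omega), ← hkey, hlook]

theorem pvAlt_eq (p : String) :
    categorize_prompt_py_alt p =
      match (pvHits ((PySem.Str.lower p).toList)).foldl pvMin none with
      | some b => b.2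
      | none => "general" := by
  simp only [categorize_prompt_py_alt]
  rw [pvFold_eq_hits]

theorem pvAlt_of_min (s : List Char) (k : Nat) (cat : String)
    (hex : (k, cat) ∈ pvHits s)
    (hlb : ∀ h ∈ pvHits s, k ≤ h.1)
    (hcat : ∀ h ∈ pvHits s, h.1 = k → h.2 = cat) :
    ∃ h, (pvHits s).foldl pvMin none = some h ∧ h.2 = cat := by
  cases s' : pvHits s with
  | nil => rw [s'] at hex; cases hex
  | cons x xs =>
    rw [s'] at hex hlb hcat
    obtain ⟨h, hfold⟩ := pvMin_fold_some xs none x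
    have hfold' : (x :: xs).foldl pvMin none = some h := hfold
    refine ⟨h, hfold', ?_⟩
    have hmem : h ∈ x :: xs := by
      rcases pvMin_fold_mem (x :: xs) none h hfold' with hc | hc
      · cases hc
      · exact hc
    have h1 : h.1 ≤ k := pvMin_fold_le (x :: xs) none h hfold' (k, cat) hex
    have h2 : k ≤ h.1 := hlb h hmem
    exact hcat h hmem (by omega)


-- per-rule coverage / category facts about the literal table (checked by computation)
theorem pvCov0 : ∀ e ∈ pvKW, e.2.1 = 0 → e.1 ∈ (["security", "analysis", "audit"] : List String).map String.toList := by decide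
theorem pvCov1 : ∀ e ∈ pvKW, e.2.1 = 1 → e.1 ∈ (["memory", "organization", "recall"] : List String).map String.toList := by decide
theorem pvCov2 : ∀ e ∈ pvKW, e.2.1 = 2 → e.1 ∈ (["monitoring", "performance", "metrics"] : List String).map String.toList := by decide
theorem pvCov3 : ∀ e ∈ pvKW, e.2.1 = 3 → e.1 ∈ (["assistance", "help", "support"] : List String).map String.toList := by decide
theorem pvCov4 : ∀ e ∈ pvKW, e.2.1 = 4 → e.1 ∈ (["stylist", "fashion", "style", "outfit", "shopping", "product", "comparison"] : List String).map String.toList := by decide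
theorem pvCov5 : ∀ e ∈ pvKW, e.2.1 = 5 → e.1 ∈ (["autonomous", "execution", "planning"] : List String).map String.toList := by decide
theorem pvPrioLe : ∀ e ∈ pvKW, e.2.1 ≤ 5 := by decide
theorem pvCat : ∀ e ∈ pvKW,
    (e.2.1 = 0 → e.2.2 = "security") ∧ (e.2.1 = 1 → e.2.2 = "memory") ∧
    (e.2.1 = 2 → e.2.2 = "monitoring") ∧ (e.2.1 = 3 → e.2.2 = "assistance") ∧
    (e.2.1 = 4 → e.2.2 = "shopping") ∧ (e.2.1 = 5 → e.2.2 = "autonomous") := by decide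

-- ===== VERDICT (by name: the statement is the Claim_ definition above) =====
theorem categorize_prompt_py_spec : Claim_equal_categorize_prompt_py := by
  intro p _
  unfold Spec_categorize_prompt_py
  rw [pvAlt_eq]
  simp only [categorize_prompt_py]
  have hIn : ∀ w : String, PySem.Str.isIn w (PySem.Str.lower p) = true ↔
      w.toList <:+: (PySem.Str.lower p).toList := fun w => PySem.Str.isIn_iff_infix ..
  set s : List Char := (PySem.Str.lower p).toList with hs
  -- a hit with a given priority exists as soon as one of that rule's keywords occurs
  have getHit : ∀ (ws : List String) (k : Nat) (cat : String),
      ws.any (fun w => PySem.Str.isIn w (PySem.Str.lower p)) = true →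
      (∀ w ∈ ws, (w.toList, k, cat) ∈ pvKW) → (k, cat) ∈ pvHits s := by
    intro ws k cat hany hall
    obtain ⟨w, hw, hin⟩ := List.any_eq_true.mp hany
    exact (pvMem_hits_iff s (k, cat)).mpr ⟨(w.toList, k, cat), hall w hw, rfl, (hIn w).mp hin⟩
  have notInf : ∀ ws : List String,
      ¬(ws.any (fun w => PySem.Str.isIn w (PySem.Str.lower p)) = true) →
      ∀ w ∈ ws, ¬(w.toList <:+: s) := by
    intro ws hws w hw hinf
    exact hws (List.any_eq_true.mpr ⟨w, hw, (hIn w).mpr hinf⟩)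
  -- no hit can carry priority j if none of rule j's keywords occurs
  have noPrio : ∀ (j : Nat) (ws : List String),
      (∀ e ∈ pvKW, e.2.1 = j → e.1 ∈ ws.map String.toList) →
      (∀ w ∈ ws, ¬(w.toList <:+: s)) →
      ∀ h ∈ pvHits s, h.1 ≠ j := by
    intro j ws hcover hnone h hh hj
    obtain ⟨e, he, he2, hinf⟩ := (pvMem_hits_iff s h).mp hh
    obtain ⟨w, hw, hwe⟩ := List.mem_map.mp (hcover e he (by rw [he2]; exact hj))
    exact hnone w hw (hwe ▸ hinf)
  have liftE : ∀ P : Nat × String → Prop, (∀ e ∈ pvKW, P e.2) → ∀ h ∈ pvHits s, P h := by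
    intro P hP h hh
    obtain ⟨e, he, he2, _⟩ := (pvMem_hits_iff s h).mp hh
    exact he2 ▸ hP e he
  have hhit5 : ∀ h ∈ pvHits s, h.1 ≤ 5 :=
    liftE (fun h => h.1 ≤ 5) (fun e he => pvPrioLe e he)
  have hcat : ∀ (k : Nat) (cat : String), (∀ e ∈ pvKW, e.2.1 = k → e.2.2 = cat) →
      ∀ h ∈ pvHits s, h.1 = k → h.2 = cat := by
    intro k cat hk
    exact liftE (fun h => h.1 = k → h.2 = cat) hk
  split_ifs with h0 h1 h2 h3 h4 h5 h6
  -- rule 0: security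
  · obtain ⟨hb, hfold, hc⟩ := pvAlt_of_min s 0 "security"
      (getHit _ 0 "security" h0 (by decide))
      (fun h hh => Nat.zero_le _)
      (hcat 0 "security" (fun e he => (pvCat e he).1))
    rw [hfold]; exact hc.symm
  -- rule 1: memory
  · obtain ⟨hb, hfold, hc⟩ := pvAlt_of_min s 1 "memory"
      (getHit _ 1 "memory" h1 (by decide))
      (fun h hh => by
        have n0 := noPrio 0 _ pvCov0 (notInf _ h0) h hh
        omega)
      (hcat 1 "memory" (fun e he => (pvCat e he).2.1))
    rw [hfold]; exact hc.symm
  -- rule 2: monitoring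
  · obtain ⟨hb, hfold, hc⟩ := pvAlt_of_min s 2 "monitoring"
      (getHit _ 2 "monitoring" h2 (by decide))
      (fun h hh => by
        have n0 := noPrio 0 _ pvCov0 (notInf _ h0) h hh
        have n1 := noPrio 1 _ pvCov1 (notInf _ h1) h hh
        omega)
      (hcat 2 "monitoring" (fun e he => (pvCat e he).2.2.1))
    rw [hfold]; exact hc.symm
  -- rule 3: assistance
  · obtain ⟨hb, hfold, hc⟩ := pvAlt_of_min s 3 "assistance"
      (getHit _ 3 "assistance" h3 (by decide))
      (fun h hh => by
        have n0 := noPrio 0 _ pvCov0 (notInf _ h0) h hh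
        have n1 := noPrio 1 _ pvCov1 (notInf _ h1) h hh
        have n2 := noPrio 2 _ pvCov2 (notInf _ h2) h hh
        omega)
      (hcat 3 "assistance" (fun e he => (pvCat e he).2.2.2.1))
    rw [hfold]; exact hc.symm
  -- rule 4a: stylist/fashion/style/outfit → shopping
  · obtain ⟨hb, hfold, hc⟩ := pvAlt_of_min s 4 "shopping"
      (getHit _ 4 "shopping" h4 (by decide))
      (fun h hh => by
        have n0 := noPrio 0 _ pvCov0 (notInf _ h0) h hh
        have n1 := noPrio 1 _ pvCov1 (notInf _ h1) h hh
        have n2 := noPrio 2 _ pvCov2 (notInf _ h2) h hh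
        have n3 := noPrio 3 _ pvCov3 (notInf _ h3) h hh
        omega)
      (hcat 4 "shopping" (fun e he => (pvCat e he).2.2.2.2.1))
    rw [hfold]; exact hc.symm
  -- rule 4b: shopping/product/comparison → shopping
  · obtain ⟨hb, hfold, hc⟩ := pvAlt_of_min s 4 "shopping"
      (getHit _ 4 "shopping" h5 (by decide))
      (fun h hh => by
        have n0 := noPrio 0 _ pvCov0 (notInf _ h0) h hh
        have n1 := noPrio 1 _ pvCov1 (notInf _ h1) h hh
        have n2 := noPrio 2 _ pvCov2 (notInf _ h2) h hh
        have n3 := noPrio 3 _ pvCov3 (notInf _ h3) h hh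
        omega)
      (hcat 4 "shopping" (fun e he => (pvCat e he).2.2.2.2.1))
    rw [hfold]; exact hc.symm
  -- rule 5: autonomous
  · have hw4 : ∀ w ∈ (["stylist", "fashion", "style", "outfit", "shopping", "product", "comparison"] : List String),
        ¬(w.toList <:+: s) := by
      have a := notInf _ h4
      have b := notInf _ h5
      intro w hw
      simp only [List.mem_cons, List.not_mem_nil, or_false] at hw
      rcases hw with rfl | rfl | rfl | rfl | rfl | rfl | rfl
      · exact a "stylist" (by simp)
      · exact a "fashion" (by simp)
      · exact a "style" (by simp)
      · exact a "outfit" (by simp)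
      · exact b "shopping" (by simp)
      · exact b "product" (by simp)
      · exact b "comparison" (by simp)
    obtain ⟨hb, hfold, hc⟩ := pvAlt_of_min s 5 "autonomous"
      (getHit _ 5 "autonomous" h6 (by decide))
      (fun h hh => by
        have n0 := noPrio 0 _ pvCov0 (notInf _ h0) h hh
        have n1 := noPrio 1 _ pvCov1 (notInf _ h1) h hh
        have n2 := noPrio 2 _ pvCov2 (notInf _ h2) h hh
        have n3 := noPrio 3 _ pvCov3 (notInf _ h3) h hh
        have n4 := noPrio 4 _ pvCov4 hw4 h hh
        omega)
      (hcat 5 "autonomous" (fun e he => (pvCat e he).2.2.2.2.2))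
    rw [hfold]; exact hc.symm
  -- no rule matched: no hits at all
  · have hw4 : ∀ w ∈ (["stylist", "fashion", "style", "outfit", "shopping", "product", "comparison"] : List String),
        ¬(w.toList <:+: s) := by
      have a := notInf _ h4
      have b := notInf _ h5
      intro w hw
      simp only [List.mem_cons, List.not_mem_nil, or_false] at hw
      rcases hw with rfl | rfl | rfl | rfl | rfl | rfl | rfl
      · exact a "stylist" (by simp)
      · exact a "fashion" (by simp)
      · exact a "style" (by simp)
      · exact a "outfit" (by simp)
      · exact b "shopping" (by simp)
      · exact b "product" (by simp)
      · exact b "comparison" (by simp)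
    have hnil : pvHits s = [] := by
      cases hh : pvHits s with
      | nil => rfl
      | cons x xs =>
        exfalso
        have hx : x ∈ pvHits s := by rw [hh]; exact List.mem_cons_self
        have n0 := noPrio 0 _ pvCov0 (notInf _ h0) x hx
        have n1 := noPrio 1 _ pvCov1 (notInf _ h1) x hx
        have n2 := noPrio 2 _ pvCov2 (notInf _ h2) x hx
        have n3 := noPrio 3 _ pvCov3 (notInf _ h3) x hx
        have n4 := noPrio 4 _ pvCov4 hw4 x hx
        have n5 := noPrio 5 _ pvCov5 (notInf _ h6) x hx
        have hle := hhit5 x hx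
        omega
    rw [hnil]
    rfl
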